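-- pv_equiv track=rewrite | github.com/Mac-Adam/Advent_Calendar | 2023/day12/day12.py | check
-- ===== SOURCE A (Python) =====
-- def check(data, rows):
--     streak = 0
--     try:
--
--         for c in data:
--             if c == "#":
--                 streak += 1
--             elif c == "." or c == "?":
--                 if streak != 0:
--                     if streak != rows.pop(0):
--                         return False
--                     streak = 0
--     except IndexError:
--         return False
--     if rows:
--         if len(rows) == 1 and rows[0] == streak:
--             return True
--         return False
--
--     return True
-- ===== SOURCE B (Python) =====
-- def check(data, rows):
--     # Phase 1: parse data into per-segment '#' counts; segments are
--     # separated by '.' or '?'; any other character is ignored.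
--     counts = [0]
--     for c in data:
--         if c == '#':
--             counts[-1] += 1
--         elif c == '.' or c == '?':
--             counts.append(0)
--     *groups, trailing = counts
--     # Phase 2: match each completed (non-empty) group against rows in order.
--     for g in groups:
--         if g:
--             if not rows:
--                 return False
--             if rows.pop(0) != g:
--                 return False
--     if rows:
--         return len(rows) == 1 and rows[0] == trailing
--     return True
-- ===== Notes on version B (the rewrite author's own statement) =====
-- stated objective: simpler
-- what changed: A validates while scanning in one interleaved loop with try/except and early returns; B first parses data into a list of per-segment '#' counts, then runs a separate validation pass of the completed groups against rows and checks the trailing count.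
import Mathlib
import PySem

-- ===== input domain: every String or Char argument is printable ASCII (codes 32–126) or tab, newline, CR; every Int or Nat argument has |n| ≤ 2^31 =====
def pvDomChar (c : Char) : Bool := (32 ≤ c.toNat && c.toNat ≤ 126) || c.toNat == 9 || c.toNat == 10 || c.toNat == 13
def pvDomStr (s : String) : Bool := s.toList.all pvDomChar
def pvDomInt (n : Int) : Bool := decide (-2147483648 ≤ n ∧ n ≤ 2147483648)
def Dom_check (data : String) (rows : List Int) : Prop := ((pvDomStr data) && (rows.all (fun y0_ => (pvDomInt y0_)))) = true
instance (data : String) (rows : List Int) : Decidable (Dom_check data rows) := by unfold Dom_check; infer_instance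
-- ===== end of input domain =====

-- B replaces A's single interleaved scan (try/except, early returns) by a parse phase
-- (per-segment '#' counts) followed by a separate validation pass; objective: simpler.
-- Note: both A and B pop matched groups from `rows` in place; the equivalence proved
-- here is about the return value.


-- ===== PORT A =====
-- the for-loop with early return / the caught IndexError of rows.pop(0)
def checkLoopA : List Char → Int → List Int → Bool
  | [], streak, rows =>
      -- after the loop: `if rows: …` then `return True`
      if !rows.isEmpty then
        if rows.length == 1 && rows.headD 0 == streak then true else false
      else true
  | c :: cs, streak, rows =>
      if c == '#' then checkLoopA cs (streak + 1) rows
      else if c == '.' || c == '?' then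
        if streak != 0 then
          match PySem.List.pop? rows 0 with
          | none => false                     -- IndexError caught: return False
          | some (r, rest) => if streak != r then false else checkLoopA cs 0 rest
        else checkLoopA cs streak rows
      else checkLoopA cs streak rows

def check (data : String) (rows : List Int) : Bool :=
  checkLoopA data.toList 0 rows

-- ===== PORT B =====
-- phase 1: `counts[-1] += 1` / `counts.append(0)` loop
-- (counts starts as [0] and never becomes empty, so getLastD 0 is exactly counts[-1])
def parseCountsB : List Char → List Int → List Int
  | [], counts => counts
  | c :: cs, counts =>
      if c == '#' then parseCountsB cs (counts.dropLast ++ [counts.getLastD 0 + 1])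
      else if c == '.' || c == '?' then parseCountsB cs (counts ++ [0])
      else parseCountsB cs counts

-- phase 2: the `for g in groups` validation loop and the trailing check
def validateB : List Int → List Int → Int → Bool
  | [], rows, trailing =>
      match rows with
      | [] => true
      | r :: _ => rows.length == 1 && r == trailing
  | g :: gs, rows, trailing =>
      if g != 0 then
        match rows with
        | [] => false
        | r :: rest => if r != g then false else validateB gs rest trailing
      else validateB gs rows trailing

def check_alt (data : String) (rows : List Int) : Bool :=
  let counts := parseCountsB data.toList [0]
  validateB counts.dropLast rows (counts.getLastD 0)

-- ===== PRECONDITION & SPEC =====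
def Spec_check (data : String) (rows : List Int) (out : Bool) : Prop := out = check_alt data rows
instance (data : String) (rows : List Int) (out : Bool) : Decidable (Spec_check data rows out) := by unfold Spec_check; infer_instance

-- ===== CLAIM (what is proved, stated in full; the proofs are below) =====
def Claim_equal_check : Prop := ∀ (data : String) (rows : List Int), Dom_check data rows → Spec_check data rows (check data rows)

-- ===== LEMMAS AND PROOFS =====

-- proof-side characterisation: the per-segment '#' counts of a char list,
-- given the count accumulated so far in the current segment
def countsOf : Int → List Char → List Int
  | s, [] => [s]
  | s, c :: cs =>
      if c = '#' then countsOf (s + 1) cs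
      else if c = '.' ∨ c = '?' then s :: countsOf 0 cs
      else countsOf s cs

theorem countsOf_ne_nil (s : Int) (cs : List Char) : countsOf s cs ≠ [] := by
  induction cs generalizing s with
  | nil => simp [countsOf]
  | cons c cs ih =>
      simp only [countsOf]
      split_ifs <;> simp [ih]

theorem parseCountsB_eq (cs : List Char) (pre : List Int) (s : Int) :
    parseCountsB cs (pre ++ [s]) = pre ++ countsOf s cs := by
  induction cs generalizing pre s with
  | nil => simp [parseCountsB, countsOf]
  | cons c cs ih =>
      simp only [parseCountsB, countsOf]
      by_cases h1 : c = '#'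
      · simp [h1, ih]
      · by_cases h2 : c = '.' ∨ c = '?'
        · have hb : (c == '.' || c == '?') = true := by
            rcases h2 with h | h <;> simp [h]
          have hc : (c == '#') = false := by simp [h1]
          simp only [hc, hb, Bool.false_eq_true, if_false, if_true, if_neg h1, if_pos h2]
          rw [ih]
          simp
        · have hb : (c == '.' || c == '?') = false := by
            simp only [Bool.or_eq_false_iff, beq_eq_false_iff_ne]
            exact ⟨fun h => h2 (Or.inl h), fun h => h2 (Or.inr h)⟩
          simp [h1, hb, h2, ih]

theorem checkLoopA_eq_validateB (cs : List Char) (s : Int) (rows : List Int) :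
    checkLoopA cs s rows = validateB (countsOf s cs).dropLast rows ((countsOf s cs).getLastD 0) := by
  induction cs generalizing s rows with
  | nil =>
      cases rows with
      | nil => rfl
      | cons r rest =>
          simp only [countsOf, List.dropLast, List.getLastD, checkLoopA, validateB,
            List.isEmpty_cons, Bool.not_false, if_true, List.headD_cons]
          split_ifs with h <;> simp_all
  | cons c cs ih =>
      simp only [checkLoopA, countsOf]
      by_cases h1 : c = '#'
      · simp [h1, ih]
      · by_cases h2 : c = '.' ∨ c = '?'
        · have hb : (c == '.' || c == '?') = true := by
            rcases h2 with h | h <;> simp [h]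
          have hc : (c == '#') = false := by simp [h1]
          obtain ⟨t, ts, hts⟩ := List.exists_cons_of_ne_nil (countsOf_ne_nil 0 cs)
          have hdl : (s :: t :: ts).dropLast = s :: (t :: ts).dropLast := by
            simp [List.dropLast]
          have hgl : (s :: t :: ts).getLastD 0 = (t :: ts).getLastD 0 := by simp
          have ih' : ∀ rs, checkLoopA cs 0 rs =
              validateB ((t :: ts).dropLast) rs ((t :: ts).getLastD 0) := by
            intro rs; rw [ih 0 rs, hts]
          simp only [hc, hb, Bool.false_eq_true, if_false, if_true, if_neg h1, if_pos h2,
            hts, hdl, hgl]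
          by_cases hs : s = 0
          · have hs' : (s != 0) = false := by simp [hs]
            rw [hs']
            simp only [validateB, hs', Bool.false_eq_true, if_false]
            rw [hs]; exact ih' rows
          · have hs' : (s != 0) = true := by simp [hs]
            rw [hs']
            simp only [validateB, hs', if_true]
            cases rows with
            | nil => rfl
            | cons r rest =>
                rw [PySem.List.pop?_zero_cons]
                by_cases hr : r = s
                · have e1 : (s != r) = false := by simp [hr]
                  have e2 : (r != s) = false := by simp [hr]
                  simp only [e1, e2, Bool.false_eq_true, if_false]
                  exact ih' rest
                · have e1 : (s != r) = true := by simp [Ne.symm hr]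
                  have e2 : (r != s) = true := by simp [hr]
                  simp only [e1, e2, if_true]
        · have hb : (c == '.' || c == '?') = false := by
            simp only [Bool.or_eq_false_iff, beq_eq_false_iff_ne]
            exact ⟨fun h => h2 (Or.inl h), fun h => h2 (Or.inr h)⟩
          simp [h1, hb, h2, ih]

-- ===== VERDICT (by name: the statement is the Claim_ definition above) =====
theorem check_spec : Claim_equal_check := by
  intro data rows _
  unfold Spec_check check check_alt
  rw [checkLoopA_eq_validateB]
  have h := parseCountsB_eq data.toList [] 0
  simp only [List.nil_append] at h
  rw [h]
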